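-- pv_equiv track=rewrite | github.com/cmejo/AI_Scholar | backend/services/knowledge_graph.py | _find_matching_entity
-- ===== SOURCE A (Python) =====
-- from typing import List, Dict, Any, Optional, Tuple, Set
--
-- def _find_matching_entity(text: str, entity_texts: List[str]) -> Optional[str]:
--     """Find entity that matches the given text"""
--     text_lower = text.lower().strip()
--
--     # Exact match
--     for entity_text in entity_texts:
--         if entity_text.lower() == text_lower:
--             return entity_text
--
--     # Partial match
--     for entity_text in entity_texts:
--         if entity_text.lower() in text_lower or text_lower in entity_text.lower():
--             return entity_text
--
--     return None
-- ===== SOURCE B (Python) =====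
-- from typing import List, Optional
--
-- def _find_matching_entity(text: str, entity_texts: List[str]) -> Optional[str]:
--     """Single pass: return exact match immediately, remember first partial match."""
--     text_lower = text.lower().strip()
--     partial = None
--     for entity_text in entity_texts:
--         entity_lower = entity_text.lower()
--         if entity_lower == text_lower:
--             return entity_text
--         if partial is None and (entity_lower in text_lower or text_lower in entity_lower):
--             partial = entity_text
--     return partial
-- ===== Notes on version B (the rewrite author's own statement) =====
-- stated objective: simpler
-- what changed: Replaces A's two full scans (exact-match loop then partial-match loop) with one single pass that returns an exact match immediately and remembers the first partial match in an accumulator returned after the loop.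
import Mathlib
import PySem

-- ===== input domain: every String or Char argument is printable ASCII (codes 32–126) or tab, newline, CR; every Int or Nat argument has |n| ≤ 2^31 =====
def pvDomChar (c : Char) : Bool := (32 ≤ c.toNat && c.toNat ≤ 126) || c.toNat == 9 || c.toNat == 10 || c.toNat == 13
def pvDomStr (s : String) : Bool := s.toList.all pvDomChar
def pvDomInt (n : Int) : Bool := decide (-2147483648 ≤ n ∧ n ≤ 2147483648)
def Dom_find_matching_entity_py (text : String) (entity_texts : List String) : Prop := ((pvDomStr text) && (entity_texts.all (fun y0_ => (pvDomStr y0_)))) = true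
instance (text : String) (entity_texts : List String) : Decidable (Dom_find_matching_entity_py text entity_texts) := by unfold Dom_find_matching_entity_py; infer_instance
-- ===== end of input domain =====

-- B replaces A's two full scans with one single pass that returns an exact match
-- immediately and remembers the first partial match; objective: simpler.

-- ===== PORT A =====
-- first loop of A: exact match
def pvExactLoop (tl : String) : List String → Option String
  | [] => none
  | e :: rest => if PySem.Str.lower e == tl then some e else pvExactLoop tl rest

-- second loop of A: partial match
def pvPartialLoop (tl : String) : List String → Option String
  | [] => none
  | e :: rest =>
      if PySem.Str.isIn (PySem.Str.lower e) tl || PySem.Str.isIn tl (PySem.Str.lower e) then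
        some e
      else pvPartialLoop tl rest

def find_matching_entity_py (text : String) (entity_texts : List String) : Option String :=
  let text_lower := PySem.Str.strip (PySem.Str.lower text)
  match pvExactLoop text_lower entity_texts with
  | some e => some e
  | none => pvPartialLoop text_lower entity_texts

-- ===== PORT B =====
-- B's single loop, carrying the 'partial' accumulator
def pvAltLoop (tl : String) (partialAcc : Option String) : List String → Option String
  | [] => partialAcc
  | e :: rest =>
      let el := PySem.Str.lower e
      if el == tl then some e
      else if partialAcc.isNone &&
              (PySem.Str.isIn el tl || PySem.Str.isIn tl el) then
        pvAltLoop tl (some e) rest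
      else pvAltLoop tl partialAcc rest

def find_matching_entity_py_alt (text : String) (entity_texts : List String) : Option String :=
  pvAltLoop (PySem.Str.strip (PySem.Str.lower text)) none entity_texts

-- ===== PRECONDITION & SPEC =====
def Spec_find_matching_entity_py (text : String) (entity_texts : List String) (out : Option String) : Prop := out = find_matching_entity_py_alt text entity_texts
instance (text : String) (entity_texts : List String) (out : Option String) : Decidable (Spec_find_matching_entity_py text entity_texts out) := by unfold Spec_find_matching_entity_py; infer_instance

-- ===== CLAIM (what is proved, stated in full; the proofs are below) =====
def Claim_equal_find_matching_entity_py : Prop := ∀ (text : String) (entity_texts : List String), Dom_find_matching_entity_py text entity_texts → Spec_find_matching_entity_py text entity_texts (find_matching_entity_py text entity_texts)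

-- ===== LEMMAS AND PROOFS =====

-- B's single loop equals: first exact match, else the carried accumulator, else A's partial loop
theorem pvAltLoop_eq (tl : String) (acc : Option String) (l : List String) :
    pvAltLoop tl acc l =
      match pvExactLoop tl l with
      | some e => some e
      | none => match acc with
                | some a => some a
                | none => pvPartialLoop tl l := by
  induction l generalizing acc with
  | nil => cases acc <;> simp [pvAltLoop, pvExactLoop, pvPartialLoop]
  | cons e rest ih =>
      simp only [pvAltLoop, pvExactLoop, pvPartialLoop]
      by_cases hx : PySem.Str.lower e == tl
      · simp [hx]
      · cases acc with
        | some a => simp [hx, ih]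
        | none =>
            simp only [hx, ih, Bool.false_eq_true, if_false, Option.isNone_none, Bool.true_and]
            cases pvExactLoop tl rest <;> split <;> simp

-- ===== VERDICT (by name: the statement is the Claim_ definition above) =====
theorem find_matching_entity_py_spec : Claim_equal_find_matching_entity_py := by
  intro text entity_texts _
  unfold Spec_find_matching_entity_py find_matching_entity_py find_matching_entity_py_alt
  rw [pvAltLoop_eq]
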